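-- pv_equiv track=rewrite | github.com/DHRUV6029/Google-Msft_InterviewQues | .idx/Other_Companies/amazon_oa_serveers_connections.py | get_min_connect_time
-- ===== SOURCE A (Python) =====
-- def get_min_connect_time(servers , n):
--     servers.sort()
--     diff = 0
--     max_diff = float('-inf')
--     for i in range(0,len(servers)-1):
--         diff+=abs(servers[i+1]-servers[i])
--         max_diff = max(max_diff,abs(servers[i+1]-servers[i]))
--
--     a = n - servers[-1]
--     b = servers[0] -1
--     diff+=(a+b+1)
--
--     max_diff = max(max_diff,(a+b+1))
--
--     return diff-max_diff
-- ===== SOURCE B (Python) =====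
-- def get_min_connect_time(servers, n):
--     # Connect time = n minus the largest empty stretch on the circle.
--     # The largest stretch between occupied positions is found WITHOUT
--     # sorting: walk the distinct values upward via repeated min over a
--     # shrinking pool of strictly greater elements.
--     lo = min(servers)
--     hi = max(servers)
--     wrap = n - hi + lo
--     best = wrap
--     if len(servers) > 1:
--         cur = lo
--         g = 0
--         pool = servers
--         while True:
--             pool = [x for x in pool if x > cur]
--             if not pool:
--                 break
--             nxt = min(pool)
--             g = max(g, nxt - cur)
--             cur = nxt
--         best = max(g, wrap)
--     return n - best
-- ===== Notes on version B (the rewrite author's own statement) =====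
-- stated objective: alternative
-- what changed: B never sorts and keeps no running gap-sum: it finds the largest gap by walking the distinct server positions upward via repeated min over a shrinking pool of strictly greater elements, and returns n minus the larger of that gap and the wrap-around gap.
import Mathlib
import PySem

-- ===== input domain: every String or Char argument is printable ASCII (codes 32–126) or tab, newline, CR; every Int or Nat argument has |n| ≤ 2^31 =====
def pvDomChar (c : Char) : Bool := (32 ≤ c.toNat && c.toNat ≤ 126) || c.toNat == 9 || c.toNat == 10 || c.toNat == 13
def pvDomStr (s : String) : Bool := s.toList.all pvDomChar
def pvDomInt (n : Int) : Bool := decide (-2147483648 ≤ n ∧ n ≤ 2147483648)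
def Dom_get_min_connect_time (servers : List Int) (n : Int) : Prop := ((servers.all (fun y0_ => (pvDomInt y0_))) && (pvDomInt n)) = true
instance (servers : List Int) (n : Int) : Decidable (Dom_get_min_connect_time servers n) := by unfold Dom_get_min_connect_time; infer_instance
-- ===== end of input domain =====

-- B finds the largest gap without sorting, by walking the distinct positions upward via
-- repeated min over a shrinking pool (objective: alternative). A sorts its argument in
-- place; the equivalence proved here is about the return value only.

-- ===== PORT A =====
-- A's loop keeps two accumulators: diff (sum of |gaps|) and max_diff, started at float('-inf'),
-- modelled as `none` (max(-inf, g) = g for every int g).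
def get_min_connect_time (servers : List Int) (n : Int) : Int :=
  let s := PySem.List.sorted servers (fun x => x)
  let st := (PySem.List.pyRange 0 ((s.length : Int) - 1) 1).foldl
      (fun (acc : Int × Option Int) i =>
        (acc.1 + |PySem.List.pyGetD s (i+1) 0 - PySem.List.pyGetD s i 0|,
         some (match acc.2 with
               | none => |PySem.List.pyGetD s (i+1) 0 - PySem.List.pyGetD s i 0|
               | some m => max m (|PySem.List.pyGetD s (i+1) 0 - PySem.List.pyGetD s i 0|))))
      ((0 : Int), (none : Option Int))
  let a := n - PySem.List.pyGetD s (-1) 0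
  let b := PySem.List.pyGetD s 0 0 - 1
  let diff := st.1 + (a + b + 1)
  let max_diff := match st.2 with
                  | none => a + b + 1
                  | some m => max m (a + b + 1)
  diff - max_diff

-- ===== PORT B =====
-- termination fact for pvWalk's while-loop: the filtered pool loses its own minimum
lemma pvWalk_dec (nxt : Int) (pool' : List Int) (hmem : nxt ∈ pool') :
    (pool'.filter (fun x => decide (nxt < x))).length < pool'.length :=
  List.length_filter_lt_length_iff_exists.mpr ⟨nxt, hmem, by simp⟩

-- B's `while True` loop: `pool` is re-filtered to the elements strictly above `cur`, the walk
-- steps to min(pool) and records the gap; it ends when nothing lies above `cur`.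
def pvWalk (cur g : Int) (pool : List Int) : Int :=
  if h : pool.filter (fun x => decide (cur < x)) = [] then g
  else
    pvWalk ((PySem.List.min? (pool.filter (fun x => decide (cur < x))) (fun y => y)).getD 0)
      (max g ((PySem.List.min? (pool.filter (fun x => decide (cur < x))) (fun y => y)).getD 0 - cur))
      (pool.filter (fun x => decide (cur < x)))
termination_by (pool.filter (fun x => decide (cur < x))).length
decreasing_by
  have hun : (List.filter (fun (x : {x // x ∈ pool}) => decide (cur < ↑x)) pool.attach).unattach
      = List.filter (fun x => decide (cur < x)) pool.attach.unattach :=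
    List.unattach_filter (hf := fun x h => rfl)
  rw [hun, List.unattach_attach]
  obtain ⟨m, hm⟩ : ∃ m, PySem.List.min? (pool.filter (fun x => decide (cur < x))) (fun y => y) = some m := by
    cases hmo : PySem.List.min? (pool.filter (fun x => decide (cur < x))) (fun y => y) with
    | none => exact absurd ((PySem.List.min?_eq_none_iff _ _).mp hmo) h
    | some m => exact ⟨m, rfl⟩
  rw [hm]
  simp only [Option.getD_some]
  exact pvWalk_dec m _ (PySem.List.min?_mem hm)

def get_min_connect_time_alt (servers : List Int) (n : Int) : Int :=
  let lo := (PySem.List.min? servers (fun y => y)).getD 0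
  let hi := (PySem.List.max? servers (fun y => y)).getD 0
  let wrap := n - hi + lo
  let best := if 1 < servers.length then max (pvWalk lo 0 servers) wrap else wrap
  n - best

-- ===== PRECONDITION & SPEC =====
-- Pre_ excludes the empty list, on which both Pythons raise (A: IndexError on servers[-1];
-- B: ValueError on min([])).
def Pre_get_min_connect_time (servers : List Int) (n : Int) : Prop := servers ≠ []
instance (servers : List Int) (n : Int) : Decidable (Pre_get_min_connect_time servers n) := by
  unfold Pre_get_min_connect_time; infer_instance
def pvWitness_get_min_connect_time : List Int × Int := ([3, 1, 7], 9)

def Spec_get_min_connect_time (servers : List Int) (n : Int) (out : Int) : Prop := out = get_min_connect_time_alt servers n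
instance (servers : List Int) (n : Int) (out : Int) : Decidable (Spec_get_min_connect_time servers n out) := by unfold Spec_get_min_connect_time; infer_instance

-- ===== CLAIM (what is proved, stated in full; the proofs are below) =====
def Claim_equal_get_min_connect_time : Prop := ∀ (servers : List Int) (n : Int), Dom_get_min_connect_time servers n → Pre_get_min_connect_time servers n → Spec_get_min_connect_time servers n (get_min_connect_time servers n)

-- ===== LEMMAS AND PROOFS =====

-- the successor-walk written over an explicit chain of values
def pvChain (cur g : Int) : List Int → Int
  | [] => g
  | v :: t => pvChain v (max g (v - cur)) t

-- ordered duplicate removal of an already-ordered list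
def pvSdedup : List Int → List Int
  | [] => []
  | [x] => [x]
  | x :: y :: t => if x = y then pvSdedup (y :: t) else x :: pvSdedup (y :: t)

-- The indexed adjacent-pairs traversal of A is the zip-with-tail traversal.
lemma zip_tail_eq_range_map (s : List Int) :
    s.zip s.tail = (List.range (s.length - 1)).map
      (fun k => (s.getD k 0, s.getD (k+1) 0)) := by
  induction s with
  | nil => simp
  | cons x t ih =>
    cases t with
    | nil => simp
    | cons y t' =>
      simp only [List.tail_cons] at ih ⊢
      simp only [List.length_cons, Nat.add_sub_cancel] at ih
      simp only [List.zip_cons_cons, List.length_cons, Nat.add_sub_cancel,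
        List.range_succ_eq_map, List.map_cons, List.map_map]
      rw [ih]
      refine List.cons_eq_cons.mpr ⟨rfl, ?_⟩
      apply List.map_congr_left
      intro k _
      simp [Function.comp]

-- adjacent pairs of a (≤)-pairwise list are ordered
lemma zip_tail_le (s : List Int) (hp : s.Pairwise (· ≤ ·)) :
    ∀ p ∈ s.zip s.tail, p.1 ≤ p.2 := by
  induction s with
  | nil => simp
  | cons x t ih =>
    cases t with
    | nil => simp
    | cons y t' =>
      intro p hp'
      simp only [List.zip_cons_cons, List.tail_cons, List.mem_cons] at hp'
      rcases hp' with h | h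
      · subst h; exact (List.pairwise_cons.mp hp).1 y (by simp)
      · exact ih (List.pairwise_cons.mp hp).2 p h

-- gaps of a nonempty list telescope to last - head
lemma gaps_sum (s : List Int) (h : s ≠ []) :
    ((s.zip s.tail).map (fun p => p.2 - p.1)).sum = s.getLast h - s.getD 0 0 := by
  induction s with
  | nil => simp at h
  | cons x t ih =>
    cases t with
    | nil => simp
    | cons y t' =>
      simp only [List.tail_cons] at ih ⊢
      simp only [List.zip_cons_cons, List.map_cons, List.sum_cons]
      rw [ih (by simp)]
      simp [List.getLast_cons]

-- the same, with the endpoints written as Python's s[-1] and s[0]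
lemma gaps_sum' (s : List Int) (h : s ≠ []) :
    ((s.zip s.tail).map (fun p => p.2 - p.1)).sum
      = PySem.List.pyGetD s (-1) 0 - PySem.List.pyGetD s 0 0 := by
  rw [PySem.List.pyGetD_neg_one s 0 h, PySem.List.pyGetD_zero]
  exact gaps_sum s h

-- the option-max fold of A over a list
lemma optmax_fold (g : List Int) :
    g.foldl (fun (acc : Option Int) v =>
        some (match acc with | none => v | some m => max m v)) none
      = (match g with | [] => none | x :: t => some (t.foldl max x)) := by
  cases g with
  | nil => rfl
  | cons x t =>
    simp only
    induction t generalizing x with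
    | nil => rfl
    | cons y t' ih => simpa [List.foldl_cons] using ih (max x y)

-- in a (≤)-pairwise list every element is at most the last one
lemma le_getLast_of_pairwise (s : List Int) (hp : s.Pairwise (· ≤ ·)) (h : s ≠ []) :
    ∀ y ∈ s, y ≤ s.getLast h := by
  induction s with
  | nil => simp at h
  | cons x t ih =>
    intro y hy
    cases t with
    | nil => simp at hy; simp [hy]
    | cons z t' =>
      rw [List.getLast_cons (by simp)]
      rcases List.mem_cons.mp hy with h1 | h1
      · subst h1
        have hx : y ≤ z := (List.pairwise_cons.mp hp).1 z (by simp)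
        have := ih (List.pairwise_cons.mp hp).2 (by simp) z (by simp)
        omega
      · exact ih (List.pairwise_cons.mp hp).2 (by simp) y h1

-- min(servers) is sorted(servers)[0]
lemma min_getD_eq_head (servers : List Int) (h : servers ≠ []) :
    (PySem.List.min? servers (fun y => y)).getD 0
      = PySem.List.pyGetD (PySem.List.sorted servers (fun x => x)) 0 0 := by
  set s := PySem.List.sorted servers (fun x => x) with hs
  have hne : s ≠ [] := by rw [hs]; simpa [PySem.List.sorted_eq_nil_iff] using h
  obtain ⟨x, t, hxt⟩ := List.exists_cons_of_ne_nil hne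
  obtain ⟨m, hm⟩ : ∃ m, PySem.List.min? servers (fun y => y) = some m := by
    cases hmo : PySem.List.min? servers (fun y => y) with
    | none => exact absurd ((PySem.List.min?_eq_none_iff _ _).mp hmo) h
    | some m => exact ⟨m, rfl⟩
  have hmmem : m ∈ servers := PySem.List.min?_mem hm
  have hmin : ∀ y ∈ servers, m ≤ y := fun y hy => PySem.List.min?_isMin hm y hy
  have hxle : ∀ y ∈ servers, x ≤ y :=
    PySem.List.key_head_sorted_le servers (fun x => x) (by rw [← hs]; exact hxt)
  have hperm : s.Perm servers := by rw [hs]; exact PySem.List.sorted_perm servers (fun x => x) false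
  have hxmem : x ∈ servers := by
    have hxs : x ∈ s := by rw [hxt]; simp
    exact hperm.subset hxs
  have h1 : m ≤ x := hmin x hxmem
  have h2 : x ≤ m := hxle m hmmem
  rw [hm, hxt, PySem.List.pyGetD_zero_cons]
  simp; omega

-- max(servers) is sorted(servers)[-1]
lemma max_getD_eq_last (servers : List Int) (h : servers ≠ []) :
    (PySem.List.max? servers (fun y => y)).getD 0
      = PySem.List.pyGetD (PySem.List.sorted servers (fun x => x)) (-1) 0 := by
  set s := PySem.List.sorted servers (fun x => x) with hs
  have hne : s ≠ [] := by rw [hs]; simpa [PySem.List.sorted_eq_nil_iff] using h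
  obtain ⟨m, hm⟩ : ∃ m, PySem.List.max? servers (fun y => y) = some m := by
    cases hmo : PySem.List.max? servers (fun y => y) with
    | none => exact absurd ((PySem.List.max?_eq_none_iff _ _).mp hmo) h
    | some m => exact ⟨m, rfl⟩
  have hmmem : m ∈ servers := PySem.List.max?_mem hm
  have hmax : ∀ y ∈ servers, y ≤ m := fun y hy => PySem.List.max?_isMax hm y hy
  have hp : s.Pairwise (· ≤ ·) := by rw [hs]; exact PySem.List.sorted_pairwise servers (fun x => x)
  have hperm : s.Perm servers := by rw [hs]; exact PySem.List.sorted_perm servers (fun x => x) false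
  have hLmem : s.getLast hne ∈ servers := hperm.subset (List.getLast_mem hne)
  have hmmem' : m ∈ s := hperm.symm.subset hmmem
  have h1 : m ≤ s.getLast hne := le_getLast_of_pairwise s hp hne m hmmem'
  have h2 : s.getLast hne ≤ m := hmax _ hLmem
  rw [hm, PySem.List.pyGetD_neg_one s 0 hne]
  simp; omega

-- the walk over any pool equals the chain over the sorted distinct values above cur
lemma walk_chain (D : List Int) (hD : D.Pairwise (· < ·)) :
    ∀ (pool : List Int) (cur g : Int),
      (∀ v, v ∈ D ↔ v ∈ pool ∧ cur < v) → pvWalk cur g pool = pvChain cur g D := by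
  induction D with
  | nil =>
    intro pool cur g hmem
    have hf : pool.filter (fun x => decide (cur < x)) = [] := by
      apply List.filter_eq_nil_iff.mpr
      intro x hx
      simp only [decide_eq_true_eq]
      intro hlt
      exact absurd ((hmem x).mpr ⟨hx, hlt⟩) (List.not_mem_nil)
    rw [pvWalk, dif_pos hf]; rfl
  | cons v t ih =>
    intro pool cur g hmem
    have hvp : v ∈ pool ∧ cur < v := (hmem v).mp (by simp)
    have hvf : v ∈ pool.filter (fun x => decide (cur < x)) := by
      simp only [List.mem_filter, decide_eq_true_eq]; exact hvp
    have hne : pool.filter (fun x => decide (cur < x)) ≠ [] := fun he => by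
      rw [he] at hvf; exact List.not_mem_nil hvf
    obtain ⟨m, hm⟩ : ∃ m, PySem.List.min? (pool.filter (fun x => decide (cur < x))) (fun y => y) = some m := by
      cases hmo : PySem.List.min? (pool.filter (fun x => decide (cur < x))) (fun y => y) with
      | none => exact absurd ((PySem.List.min?_eq_none_iff _ _).mp hmo) hne
      | some m => exact ⟨m, rfl⟩
    have hmmem : m ∈ pool.filter (fun x => decide (cur < x)) := PySem.List.min?_mem hm
    have hmv : m = v := by
      have hm' : m ∈ pool ∧ cur < m := by
        have := hmmem; simp only [List.mem_filter, decide_eq_true_eq] at this; exact this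
      have hmD : m ∈ v :: t := (hmem m).mpr hm'
      have hle : m ≤ v := PySem.List.min?_isMin hm v hvf
      rcases List.mem_cons.mp hmD with h1 | h1
      · exact h1
      · have : v < m := (List.pairwise_cons.mp hD).1 m h1
        omega
    rw [pvWalk, dif_neg hne, hm]
    simp only [Option.getD_some, hmv]
    have ht : ∀ w, w ∈ t ↔ w ∈ pool.filter (fun x => decide (cur < x)) ∧ v < w := by
      intro w
      constructor
      · intro hw
        have hwD : w ∈ v :: t := by simp [hw]
        have hw' := (hmem w).mp hwD
        refine ⟨by simp only [List.mem_filter, decide_eq_true_eq]; exact hw', ?_⟩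
        exact (List.pairwise_cons.mp hD).1 w hw
      · rintro ⟨hwf, hvw⟩
        have hw' : w ∈ pool ∧ cur < w := by
          simpa only [List.mem_filter, decide_eq_true_eq] using hwf
        rcases List.mem_cons.mp ((hmem w).mpr hw') with h1 | h1
        · omega
        · exact h1
    exact ih (List.pairwise_cons.mp hD).2 _ v (max g (v - cur)) ht

-- the chain is a running max over the adjacent gaps of (cur :: D)
lemma chain_eq_gaps_fold (D : List Int) : ∀ cur g,
    pvChain cur g D = (((cur :: D).zip D).map (fun p => p.2 - p.1)).foldl max g := by
  induction D with
  | nil => intro cur g; simp [pvChain]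
  | cons v t ih =>
    intro cur g
    simp only [pvChain, List.zip_cons_cons, List.map_cons, List.foldl_cons]
    exact ih v (max g (v - cur))

-- pvSdedup keeps the head
lemma sdedup_cons_head (t : List Int) : ∀ x, ∃ r, pvSdedup (x :: t) = x :: r := by
  induction t with
  | nil => intro x; exact ⟨[], rfl⟩
  | cons y t' ih =>
    intro x
    by_cases h : x = y
    · obtain ⟨r, hr⟩ := ih y
      exact ⟨r, by simp [pvSdedup, h, hr]⟩
    · exact ⟨pvSdedup (y :: t'), by simp [pvSdedup, h]⟩

lemma mem_sdedup (l : List Int) : ∀ v, v ∈ pvSdedup l ↔ v ∈ l := by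
  induction l using pvSdedup.induct with
  | case1 => simp [pvSdedup]
  | case2 x => simp [pvSdedup]
  | case3 y t ih =>
    intro v
    simp only [pvSdedup, if_true]
    rw [ih v]
    simp [List.mem_cons]
  | case4 x y t h ih =>
    intro v
    simp only [pvSdedup, if_neg h, List.mem_cons, ih v]

lemma sdedup_pairwise_lt (l : List Int) (hp : l.Pairwise (· ≤ ·)) :
    (pvSdedup l).Pairwise (· < ·) := by
  induction l using pvSdedup.induct with
  | case1 => simp [pvSdedup]
  | case2 x => simp [pvSdedup]
  | case3 y t ih =>
    simp only [pvSdedup, if_true]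
    exact ih (List.pairwise_cons.mp hp).2
  | case4 x y t h ih =>
    simp only [pvSdedup, if_neg h]
    refine List.pairwise_cons.mpr ⟨?_, ih (List.pairwise_cons.mp hp).2⟩
    intro z hz
    have hzmem : z ∈ y :: t := (mem_sdedup _ z).mp hz
    have hxy : x ≤ y := (List.pairwise_cons.mp hp).1 y (by simp)
    have hxlty : x < y := lt_of_le_of_ne hxy h
    rcases List.mem_cons.mp hzmem with h1 | h1
    · omega
    · have : y ≤ z := (List.pairwise_cons.mp (List.pairwise_cons.mp hp).2).1 z h1
      omega

-- running max (from a nonneg start) over the gaps ignores the zero gaps of duplicates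
lemma gaps_fold_sdedup (l : List Int) (hp : l.Pairwise (· ≤ ·)) :
    ∀ g, 0 ≤ g →
      ((l.zip l.tail).map (fun p => p.2 - p.1)).foldl max g
        = (((pvSdedup l).zip (pvSdedup l).tail).map (fun p => p.2 - p.1)).foldl max g := by
  induction l using pvSdedup.induct with
  | case1 => intro g _; simp [pvSdedup]
  | case2 x => intro g _; simp [pvSdedup]
  | case3 y t ih =>
    intro g hg
    simp only [pvSdedup, if_true]
    simp only [List.tail_cons, List.zip_cons_cons, List.map_cons, List.foldl_cons, sub_self]
    have hmax : max g 0 = g := by omega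
    rw [hmax]
    exact ih (List.pairwise_cons.mp hp).2 g hg
  | case4 x y t h ih =>
    intro g hg
    have hxy : x ≤ y := (List.pairwise_cons.mp hp).1 y (by simp)
    obtain ⟨r, hr⟩ := sdedup_cons_head t y
    have ih' := ih (List.pairwise_cons.mp hp).2 (max g (y - x)) (by omega)
    rw [hr] at ih'
    simp only [List.tail_cons, List.zip_cons_cons, List.map_cons, List.foldl_cons] at ih' ⊢
    conv_rhs => rw [show pvSdedup (x :: y :: t) = x :: y :: r by simp [pvSdedup, h, hr]]
    simp only [List.tail_cons, List.zip_cons_cons, List.map_cons, List.foldl_cons]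
    exact ih' 

-- the walk from the minimum computes the running max over all adjacent sorted gaps
lemma walk_eq_gaps_fold (servers : List Int) (h : servers ≠ []) :
    pvWalk (PySem.List.pyGetD (PySem.List.sorted servers (fun x => x)) 0 0) 0 servers
      = (((PySem.List.sorted servers (fun x => x)).zip
            (PySem.List.sorted servers (fun x => x)).tail).map (fun p => p.2 - p.1)).foldl max 0 := by
  set s := PySem.List.sorted servers (fun x => x) with hs
  have hne : s ≠ [] := by rw [hs]; simpa [PySem.List.sorted_eq_nil_iff] using h
  have hp : s.Pairwise (· ≤ ·) := by rw [hs]; exact PySem.List.sorted_pairwise servers (fun x => x)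
  obtain ⟨x, t, hxt⟩ := List.exists_cons_of_ne_nil hne
  have hH : PySem.List.pyGetD s 0 0 = x := by rw [hxt, PySem.List.pyGetD_zero_cons]
  obtain ⟨D, hD⟩ := sdedup_cons_head t x
  have hDfull : pvSdedup s = x :: D := by rw [hxt]; exact hD
  have hplt : (x :: D).Pairwise (· < ·) := by rw [← hDfull]; exact sdedup_pairwise_lt s hp
  have hperm : s.Perm servers := by rw [hs]; exact PySem.List.sorted_perm servers (fun x => x) false
  have hmemD : ∀ v, v ∈ D ↔ v ∈ servers ∧ x < v := by
    intro v
    constructor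
    · intro hv
      have hvs : v ∈ s := by
        rw [← mem_sdedup s v, hDfull]; simp [hv]
      exact ⟨hperm.subset hvs, (List.pairwise_cons.mp hplt).1 v hv⟩
    · rintro ⟨hv, hxv⟩
      have hvs : v ∈ pvSdedup s := by
        rw [mem_sdedup s v]
        exact hperm.symm.subset hv
      rw [hDfull] at hvs
      rcases List.mem_cons.mp hvs with h1 | h1
      · omega
      · exact h1
  rw [hH, walk_chain D (List.pairwise_cons.mp hplt).2 servers x 0 hmemD, chain_eq_gaps_fold]
  rw [show D = (pvSdedup s).tail by rw [hDfull, List.tail_cons]]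
  rw [show x :: (pvSdedup s).tail = pvSdedup s by rw [hDfull, List.tail_cons]]
  exact (gaps_fold_sdedup s hp 0 le_rfl).symm

-- ===== VERDICT (by name: the statement is the Claim_ definition above) =====
theorem get_min_connect_time_spec : Claim_equal_get_min_connect_time := by
  intro servers n _ hpre
  have hpre' : servers ≠ [] := hpre
  unfold Spec_get_min_connect_time get_min_connect_time get_min_connect_time_alt
  simp only []
  rw [min_getD_eq_head servers hpre', max_getD_eq_last servers hpre',
    walk_eq_gaps_fold servers hpre']
  set s := PySem.List.sorted servers (fun x => x) with hs
  have hne : s ≠ [] := by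
    rw [hs]; simpa [PySem.List.sorted_eq_nil_iff] using hpre'
  have hp : s.Pairwise (fun a b => a ≤ b) := by
    rw [hs]; exact PySem.List.sorted_pairwise servers (fun x => x)
  have hlenss : s.length = servers.length := by
    rw [hs]; exact PySem.List.length_sorted servers (fun x => x) false
  clear_value s
  have habs : ∀ p ∈ s.zip s.tail, |p.2 - p.1| = p.2 - p.1 := by
    intro p hp'
    exact abs_of_nonneg (by have := zip_tail_le s hp p hp'; omega)
  have hlen : (((s.length : Int) - 1) - 0).toNat = s.length - 1 := by omega
  -- A's indexed fold is a fold over the adjacent pairs (abs dropped by sortedness)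
  have hA :
      (PySem.List.pyRange 0 ((s.length : Int) - 1) 1).foldl
        (fun (acc : Int × Option Int) i =>
          (acc.1 + |PySem.List.pyGetD s (i+1) 0 - PySem.List.pyGetD s i 0|,
           some (match acc.2 with
                 | none => |PySem.List.pyGetD s (i+1) 0 - PySem.List.pyGetD s i 0|
                 | some m => max m (|PySem.List.pyGetD s (i+1) 0 - PySem.List.pyGetD s i 0|))))
        ((0 : Int), (none : Option Int))
      = (s.zip s.tail).foldl
          (fun (acc : Int × Option Int) p =>
            (acc.1 + (p.2 - p.1),
             some (match acc.2 with
                   | none => p.2 - p.1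
                   | some m => max m (p.2 - p.1))))
          ((0 : Int), (none : Option Int)) := by
    rw [PySem.List.pyRange_one, hlen, List.foldl_map, zip_tail_eq_range_map s, List.foldl_map]
    apply PySem.List.foldl_congr_mem
    intro acc k hk
    have h2 : ((k : Int) + 1) = (((k + 1 : Nat)) : Int) := by push_cast; ring
    have hmem : (s.getD k 0, s.getD (k+1) 0) ∈ s.zip s.tail := by
      rw [zip_tail_eq_range_map s]; exact List.mem_map_of_mem hk
    have habs' : |s.getD (k+1) 0 - s.getD k 0| = s.getD (k+1) 0 - s.getD k 0 := habs _ hmem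
    have h1 : ((0 : Int) + (k : Int)) = ((k : Nat) : Int) := by omega
    rw [h1, h2, PySem.List.pyGetD_natCast, PySem.List.pyGetD_natCast]
    simp only []
    rw [habs']
  rw [hA]
  rw [PySem.List.foldl_prod_mk
      (f := fun (a : Int) (p : Int × Int) => a + (p.2 - p.1))
      (g := fun (o : Option Int) (p : Int × Int) =>
        some (match o with | none => p.2 - p.1 | some m => max m (p.2 - p.1)))]
  simp only []
  rw [PySem.List.foldl_add, gaps_sum' s hne]
  have hmaxfold : (s.zip s.tail).foldl
      (fun (o : Option Int) (p : Int × Int) =>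
        some (match o with | none => p.2 - p.1 | some m => max m (p.2 - p.1))) none
      = ((s.zip s.tail).map (fun p => p.2 - p.1)).foldl
          (fun (acc : Option Int) v =>
            some (match acc with | none => v | some m => max m v)) none := by
    rw [List.foldl_map]
  rw [hmaxfold, optmax_fold]
  -- case on whether there is at least one adjacent gap
  cases hg : (s.zip s.tail).map (fun p => p.2 - p.1) with
  | nil =>
    have hzip : s.zip s.tail = [] := by
      cases hz : s.zip s.tail with
      | nil => rfl
      | cons p q => rw [hz] at hg; simp at hg
    have hlen1 : ¬ (1 < servers.length) := by
      rcases List.zip_eq_nil_iff.mp hzip with h1 | h1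
      · exact absurd h1 hne
      · have h2 : s.tail.length = s.length - 1 := List.length_tail ..
        rw [h1] at h2
        simp only [List.length_nil] at h2
        omega
    rw [if_neg hlen1]
    simp only []
    simp
    omega
  | cons gx gt =>
    have hgx0 : 0 ≤ gx := by
      have hmemgx : gx ∈ (s.zip s.tail).map (fun p => p.2 - p.1) := by rw [hg]; simp
      obtain ⟨p, hpmem, hpeq⟩ := List.mem_map.mp hmemgx
      have := zip_tail_le s hp p hpmem
      omega
    have hlen2 : 1 < servers.length := by
      have h1 := congrArg List.length hg
      have h3 : (s.zip s.tail).length = min s.length s.tail.length := List.length_zip ..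
      have h2 : s.tail.length = s.length - 1 := List.length_tail ..
      simp only [List.length_map, List.length_cons] at h1
      omega
    rw [if_pos hlen2]
    simp only [List.foldl_cons]
    have hmax0 : max (0:Int) gx = gx := by omega
    rw [hmax0]
    -- pure arithmetic: both sides are n minus the same maximum
    have harith : n - PySem.List.pyGetD s (-1) 0 + (PySem.List.pyGetD s 0 0 - 1) + 1
        = n - PySem.List.pyGetD s (-1) 0 + PySem.List.pyGetD s 0 0 := by ring
    rw [harith]
    generalize max (List.foldl max gx gt) (n - PySem.List.pyGetD s (-1) 0 + PySem.List.pyGetD s 0 0) = M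
    omega
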